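-- pv_equiv track=rewrite | github.com/coffeyhouse/next-chapter-backend | backend/utils/data_transformer.py | format_tables
-- ===== SOURCE A (Python) =====
-- from typing import Dict, List, Any, Optional
--
-- def format_tables(tables: Dict[str, List[Dict]]) -> str:
--     """Format the tables data for display"""
--     output = []
--
--     for table_name, records in tables.items():
--         if records:  # Only show tables with data
--             output.append(f"\n=== {table_name} ===")
--             for record in records:
--                 output.append("-" * 40)
--                 for field, value in record.items():
--                     output.append(f"{field:<20} {value}")
--
--     # Add summary section
--     output.append("\nSummary:")
--     for table_name, records in tables.items():
--         if records:
--             output.append(f"{table_name}: {len(records)} records")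
--
--     return "\n".join(output)
-- ===== SOURCE B (Python) =====
-- def format_tables(tables):
--     """Format the tables data for display (divide-and-conquer: merge (details, summary) string pairs)"""
--     def fmt(items):
--         if not items:
--             return ("", "")
--         if len(items) == 1:
--             name, records = items[0]
--             if not records:
--                 return ("", "")
--             block = f"\n=== {name} ===\n"
--             for record in records:
--                 block += "-" * 40 + "\n"
--                 for field, value in record.items():
--                     block += f"{field:<20} {value}\n"
--             return (block, f"\n{name}: {len(records)} records")
--         mid = len(items) // 2
--         d1, s1 = fmt(items[:mid])
--         d2, s2 = fmt(items[mid:])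
--         return (d1 + d2, s1 + s2)
--     details, summary = fmt(list(tables.items()))
--     return details + "\nSummary:" + summary
-- ===== Notes on version B (the rewrite author's own statement) =====
-- stated objective: alternative
-- what changed: A makes two passes over the tables dict, appending display lines to one list and joining them at the end; B is a divide-and-conquer recursion over the table list that returns a (details, summary) string pair for each half and merges the pairs by concatenation, never building a line list or calling join.
import Mathlib
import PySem

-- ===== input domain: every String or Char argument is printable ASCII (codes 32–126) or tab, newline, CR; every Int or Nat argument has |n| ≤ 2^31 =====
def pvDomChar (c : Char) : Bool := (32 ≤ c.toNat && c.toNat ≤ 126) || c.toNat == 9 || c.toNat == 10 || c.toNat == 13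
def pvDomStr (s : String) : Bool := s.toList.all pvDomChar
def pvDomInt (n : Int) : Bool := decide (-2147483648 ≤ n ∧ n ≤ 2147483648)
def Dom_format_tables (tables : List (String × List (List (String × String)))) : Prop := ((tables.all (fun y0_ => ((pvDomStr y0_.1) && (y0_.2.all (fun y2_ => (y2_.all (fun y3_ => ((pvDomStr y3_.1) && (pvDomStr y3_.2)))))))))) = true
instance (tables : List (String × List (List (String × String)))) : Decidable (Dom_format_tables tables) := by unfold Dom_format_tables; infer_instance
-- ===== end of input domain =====

-- B replaces A's two list-building passes + join with a divide-and-conquer over the table list that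
-- merges (details, summary) string pairs; same output, same O(n) total work ("alternative", not faster).

-- shared line formatters (the same f-strings appear in both Pythons)
-- f"\n=== {table_name} ==="
def pvHeader (tn : String) : String := "\n=== " ++ tn ++ " ==="
-- "-" * 40
def pvDashes : String := String.ofList (List.replicate 40 '-')
-- f"{field:<20} {value}"  (left-justify to width 20 with spaces; exact for this format spec on any string)
def pvFieldLine (f v : String) : String :=
  String.ofList (f.toList ++ List.replicate (20 - f.toList.length) ' ') ++ " " ++ v
-- f"{table_name}: {len(records)} records"
def pvSummaryLine (tn : String) (n : Int) : String := tn ++ ": " ++ PySem.Int.toStr n ++ " records"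

-- ===== PORT A =====
def format_tables (tables : List (String × List (List (String × String)))) : String :=
  let output : List String :=
    tables.foldl (fun output p =>
      if p.2 ≠ [] then
        p.2.foldl (fun output record =>
          record.foldl (fun output fv => output ++ [pvFieldLine fv.1 fv.2])
            (output ++ [pvDashes]))
          (output ++ [pvHeader p.1])
      else output) []
  let output := output ++ ["\nSummary:"]
  let output :=
    tables.foldl (fun output p =>
      if p.2 ≠ [] then output ++ [pvSummaryLine p.1 (p.2.length : Int)] else output) output
  PySem.Str.join "\n" output

-- ===== PORT B =====
-- the len(items) == 1 base case of fmt: one table's (details block, summary line) pair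
def pvBase (p : String × List (List (String × String))) : String × String :=
  if p.2 = [] then ("", "")
  else
    let block := p.2.foldl (fun block record =>
        record.foldl (fun block fv => block ++ pvFieldLine fv.1 fv.2 ++ "\n")
          (block ++ pvDashes ++ "\n"))
      (pvHeader p.1 ++ "\n")
    (block, "\n" ++ pvSummaryLine p.1 (p.2.length : Int))

-- fmt(items): split in half, recurse, concatenate the two (details, summary) pairs
def pvFmtB : List (String × List (List (String × String))) → String × String
  | [] => ("", "")
  | p :: rest =>
    if rest = [] then pvBase p
    else
      let mid := (p :: rest).length / 2
      let l := pvFmtB ((p :: rest).take mid)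
      let r := pvFmtB ((p :: rest).drop mid)
      (l.1 ++ r.1, l.2 ++ r.2)
termination_by items => items.length
decreasing_by
  · simp [List.length_take]
    omega
  · have hp : 0 < rest.length := List.length_pos_of_ne_nil (by assumption)
    simp
    omega

def format_tables_alt (tables : List (String × List (List (String × String)))) : String :=
  let ds := pvFmtB tables
  ds.1 ++ "\nSummary:" ++ ds.2

-- ===== PRECONDITION & SPEC =====
def Spec_format_tables (tables : List (String × List (List (String × String)))) (out : String) : Prop := out = format_tables_alt tables
instance (tables : List (String × List (List (String × String)))) (out : String) : Decidable (Spec_format_tables tables out) := by unfold Spec_format_tables; infer_instance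

-- ===== CLAIM =====
def Claim_equal_format_tables : Prop := ∀ (tables : List (String × List (List (String × String)))), Dom_format_tables tables → Spec_format_tables tables (format_tables tables)

-- ===== LEMMAS AND PROOFS =====

-- concatenation of a list of strings
def pvCat (ls : List String) : String := ls.foldr (· ++ ·) ""

def pvLine (fv : String × String) : String := pvFieldLine fv.1 fv.2

-- the lines A emits for one nonempty table
def pvBlockLines (p : String × List (List (String × String))) : List String :=
  [pvHeader p.1] ++ p.2.flatMap (fun r => [pvDashes] ++ r.map pvLine)

-- per-table contribution to the details / summary strings
def pvDpart (p : String × List (List (String × String))) : String :=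
  if p.2 ≠ [] then
    (pvHeader p.1 ++ "\n") ++
      pvCat (p.2.map (fun r => (pvDashes ++ "\n") ++ pvCat ((r.map pvLine).map (· ++ "\n"))))
  else ""

def pvSpart (p : String × List (List (String × String))) : String :=
  if p.2 ≠ [] then "\n" ++ pvSummaryLine p.1 (p.2.length : Int) else ""

theorem pvCat_append (xs ys : List String) : pvCat (xs ++ ys) = pvCat xs ++ pvCat ys := by
  induction xs with
  | nil => simp [pvCat]
  | cons x xs ih => simp [pvCat, List.foldr_cons] at ih ⊢; rw [ih, String.append_assoc]

-- pvCat over a flatMap regroups per element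
theorem pvCat_flatMap {α : Type} (l : List α) (f : α → List String) (g : String → String) :
    pvCat ((l.flatMap f).map g) = pvCat (l.map (fun x => pvCat ((f x).map g))) := by
  induction l with
  | nil => simp [pvCat]
  | cons a l ih =>
    simp only [List.flatMap_cons, List.map_append, List.map_cons]
    rw [pvCat_append, ih]
    simp [pvCat]

-- pvCat over a filtered map becomes an if-map
theorem pvCat_filter {α : Type} (l : List α) (q : α → Bool) (g : α → String) :
    pvCat ((l.filter q).map g) = pvCat (l.map (fun x => if q x then g x else "")) := by
  induction l with
  | nil => simp
  | cons a l ih =>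
    rw [List.filter_cons]
    by_cases h : q a = true
    · simp only [if_pos h, List.map_cons, pvCat, List.foldr_cons]
      simp [pvCat] at ih; rw [ih]
    · simp only [if_neg h, List.map_cons]
      have : (if q a = true then g a else "") = "" := by simp [h]
      simp [pvCat] at ih ⊢; rw [ih]

-- ===== Str.join "\n" in terms of pvCat =====
theorem pvJoin_cons (x : String) (t : List String) (ht : t ≠ []) :
    PySem.Str.join "\n" (x :: t) = x ++ "\n" ++ PySem.Str.join "\n" t := by
  match t with
  | y :: ys =>
    simp [PySem.Str.join, PySem.Chars.join_cons_cons]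
    apply String.toList_injective
    simp

theorem pvJoin_head (ys : List String) (m : String) :
    PySem.Str.join "\n" (m :: ys) = m ++ pvCat (ys.map ("\n" ++ ·)) := by
  induction ys generalizing m with
  | nil => simp [PySem.Str.join, pvCat]
  | cons y ys ih =>
    rw [pvJoin_cons m (y :: ys) (by simp), ih y]
    simp [pvCat, String.append_assoc]

theorem pvJoin_split (xs : List String) (m : String) (ys : List String) :
    PySem.Str.join "\n" (xs ++ m :: ys)
      = pvCat (xs.map (· ++ "\n")) ++ m ++ pvCat (ys.map ("\n" ++ ·)) := by
  induction xs with
  | nil =>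
    rw [List.nil_append, pvJoin_head]
    simp [pvCat]
  | cons x xs ih =>
    rw [List.cons_append, pvJoin_cons x (xs ++ m :: ys) (by simp), ih]
    simp [pvCat, String.append_assoc]

-- ===== A-side: the two loops as flatMap / filter-map =====
theorem pvA_records_eq (rs : List (List (String × String))) (init : List String) :
    rs.foldl (fun output record =>
        record.foldl (fun output fv => output ++ [pvFieldLine fv.1 fv.2])
          (output ++ [pvDashes])) init
    = init ++ rs.flatMap (fun record => [pvDashes] ++ record.map pvLine) := by
  induction rs generalizing init with
  | nil => simp
  | cons r rest ih =>
    simp only [List.foldl_cons, List.flatMap_cons]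
    rw [PySem.List.foldl_append_singleton_eq_map, ih]
    simp [pvLine]

theorem pvA_loop1_eq (tables : List (String × List (List (String × String))))
    (acc : List String) :
    tables.foldl (fun output p =>
      if p.2 ≠ [] then
        p.2.foldl (fun output record =>
          record.foldl (fun output fv => output ++ [pvFieldLine fv.1 fv.2])
            (output ++ [pvDashes]))
          (output ++ [pvHeader p.1])
      else output) acc
    = acc ++ tables.flatMap (fun p => if p.2 ≠ [] then pvBlockLines p else []) := by
  induction tables generalizing acc with
  | nil => simp
  | cons t ts ih =>
    simp only [List.foldl_cons, List.flatMap_cons]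
    by_cases h : t.2 ≠ []
    · rw [if_pos h, if_pos h, pvA_records_eq, ih]
      simp [pvBlockLines]
    · rw [if_neg h, if_neg h, ih]
      simp

theorem pvA_loop2_eq (tables : List (String × List (List (String × String))))
    (acc : List String) :
    tables.foldl (fun output p =>
      if p.2 ≠ [] then output ++ [pvSummaryLine p.1 (p.2.length : Int)] else output) acc
    = acc ++ (tables.filter (fun p => p.2 ≠ [])).map
        (fun p => pvSummaryLine p.1 (p.2.length : Int)) := by
  induction tables generalizing acc with
  | nil => simp
  | cons t ts ih =>
    simp only [List.foldl_cons, List.filter_cons]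
    by_cases h : t.2 ≠ []
    · rw [if_pos h, ih]
      simp [h]
    · rw [if_neg h, ih]
      simp [h]

-- ===== B-side: pvFmtB computes the per-table concatenations =====
theorem pvFold_line (r : List (String × String)) (b0 : String) :
    r.foldl (fun b fv => b ++ pvFieldLine fv.1 fv.2 ++ "\n") b0
    = b0 ++ pvCat ((r.map pvLine).map (· ++ "\n")) := by
  induction r generalizing b0 with
  | nil => simp [pvCat]
  | cons fv r ih =>
    simp only [List.foldl_cons, List.map_cons]
    rw [ih]
    simp [pvCat, pvLine, String.append_assoc]

theorem pvFold_block (rs : List (List (String × String))) (b0 : String) :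
    rs.foldl (fun block record =>
        record.foldl (fun block fv => block ++ pvFieldLine fv.1 fv.2 ++ "\n")
          (block ++ pvDashes ++ "\n")) b0
    = b0 ++ pvCat (rs.map (fun r => (pvDashes ++ "\n") ++ pvCat ((r.map pvLine).map (· ++ "\n")))) := by
  induction rs generalizing b0 with
  | nil => simp [pvCat]
  | cons r rs ih =>
    simp only [List.foldl_cons]
    rw [pvFold_line, ih]
    simp [pvCat, String.append_assoc]

theorem pvCat_cons (x : String) (l : List String) : pvCat (x :: l) = x ++ pvCat l := rfl

theorem pvBase_eq (p : String × List (List (String × String))) :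
    pvBase p = (pvDpart p, pvSpart p) := by
  by_cases h : p.2 = []
  · simp [pvBase, pvDpart, pvSpart, h]
  · simp only [pvBase, pvDpart, pvSpart, if_neg h, if_pos h]
    rw [pvFold_block]

theorem pvFmtB_eq (items : List (String × List (List (String × String)))) :
    pvFmtB items = (pvCat (items.map pvDpart), pvCat (items.map pvSpart)) := by
  induction items using pvFmtB.induct with
  | case1 => simp [pvFmtB, pvCat]
  | case2 p =>
    rw [pvFmtB, if_pos rfl, pvBase_eq]
    simp [pvCat]
  | case3 p rest h mid ihl ihr =>
    have ihl' : pvFmtB (List.take ((p :: rest).length / 2) (p :: rest))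
        = (pvCat (List.map pvDpart (List.take ((p :: rest).length / 2) (p :: rest))),
           pvCat (List.map pvSpart (List.take ((p :: rest).length / 2) (p :: rest)))) := ihl
    have ihr' : pvFmtB (List.drop ((p :: rest).length / 2) (p :: rest))
        = (pvCat (List.map pvDpart (List.drop ((p :: rest).length / 2) (p :: rest))),
           pvCat (List.map pvSpart (List.drop ((p :: rest).length / 2) (p :: rest)))) := ihr
    rw [pvFmtB, if_neg h]
    show ((pvFmtB (List.take ((p :: rest).length / 2) (p :: rest))).1 ++
            (pvFmtB (List.drop ((p :: rest).length / 2) (p :: rest))).1,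
          (pvFmtB (List.take ((p :: rest).length / 2) (p :: rest))).2 ++
            (pvFmtB (List.drop ((p :: rest).length / 2) (p :: rest))).2)
        = (pvCat (List.map pvDpart (p :: rest)), pvCat (List.map pvSpart (p :: rest)))
    rw [ihl', ihr']
    dsimp only
    rw [← pvCat_append, ← pvCat_append, ← List.map_append, ← List.map_append,
        List.take_append_drop]

-- ===== VERDICT =====
theorem format_tables_spec : Claim_equal_format_tables := by
  intro tables _
  unfold Spec_format_tables format_tables format_tables_alt
  dsimp only
  rw [pvA_loop1_eq, pvA_loop2_eq, pvFmtB_eq]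
  dsimp only
  rw [List.nil_append, List.append_assoc, List.singleton_append, pvJoin_split,
      pvCat_flatMap, List.map_map, pvCat_filter]
  have hd : List.map (fun x => pvCat (List.map (fun s => s ++ "\n")
        (if x.2 ≠ [] then pvBlockLines x else []))) tables
      = List.map pvDpart tables := by
    apply List.map_congr_left
    intro p _
    by_cases h : p.2 = []
    · simp [h, pvDpart, pvCat]
    · rw [if_pos h, pvDpart, if_pos h, pvBlockLines]
      simp only [List.singleton_append, List.map_cons, pvCat_cons]
      rw [pvCat_flatMap]
      apply congrArg
      apply congrArg
      apply List.map_congr_left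
      intro r _
      simp only [List.map_cons, pvCat_cons]
  rw [hd]
  congr 1
  apply congrArg
  apply List.map_congr_left
  intro p _
  by_cases h : p.2 = []
  · simp [h, pvSpart]
  · simp [h, pvSpart]
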